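-- pv_equiv track=rewrite | github.com/Summerimm/TIL | practice/python/python_05_4_P.py | sum_of_repeat_number
-- ===== SOURCE A (Python) =====
-- def sum_of_repeat_number(data):
--     numdict = {}
--     sum = 0
--
--     for num in data:
--         if num in numdict.keys():
--             numdict[num] += 1
--         else:
--             numdict[num] = 1
--
--     for keynum, cnt in numdict.items():
--         if cnt == 1:
--             sum += keynum
--
--     return sum
-- ===== SOURCE B (Python) =====
-- def sum_of_repeat_number(data):
--     counts = {}
--     total = 0
--     for num in data:
--         c = counts.get(num, 0) + 1
--         counts[num] = c
--         if c == 1: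
--             total += num
--         elif c == 2:
--             total -= num
--     return total
-- ===== Notes on version B (the rewrite author's own statement) =====
-- stated objective: alternative
-- what changed: Fuses counting and summing into one pass: each number is added to the running total when first seen and subtracted when seen a second time, eliminating A's second loop over the dict.
import Mathlib
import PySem

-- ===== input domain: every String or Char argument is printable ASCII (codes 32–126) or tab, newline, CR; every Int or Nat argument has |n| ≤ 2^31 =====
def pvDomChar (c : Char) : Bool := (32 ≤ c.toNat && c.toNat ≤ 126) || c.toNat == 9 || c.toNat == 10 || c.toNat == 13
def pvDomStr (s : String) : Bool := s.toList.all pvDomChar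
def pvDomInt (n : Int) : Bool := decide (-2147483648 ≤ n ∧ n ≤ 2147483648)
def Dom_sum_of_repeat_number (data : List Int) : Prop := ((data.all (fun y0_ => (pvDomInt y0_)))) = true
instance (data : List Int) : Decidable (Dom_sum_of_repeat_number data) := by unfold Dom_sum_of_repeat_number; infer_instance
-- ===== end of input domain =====

-- B fuses counting and summing into one pass (add on first sight, subtract on second),
-- eliminating A's second loop over the dict.

-- ===== PORT A =====
-- first loop: count occurrences; 'numdict[num] += 1' is exact here since the key is present (getD default never used)
def sum_of_repeat_number (data : List Int) : Int :=
  let numdict : PySem.Dict Int Int :=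
    data.foldl (fun d num =>
      if d.contains num then d.insert num (d.getD num 0 + 1)
      else d.insert num 1) PySem.Dict.empty
  numdict.items.foldl (fun s p => if p.2 == 1 then s + p.1 else s) 0

-- ===== PORT B =====
def sum_of_repeat_number_alt (data : List Int) : Int :=
  (data.foldl (fun st num =>
      let c := st.1.getD num 0 + 1
      (st.1.insert num c,
       if c == 1 then st.2 + num else if c == 2 then st.2 - num else st.2))
    ((PySem.Dict.empty : PySem.Dict Int Int), (0 : Int))).2

-- ===== PRECONDITION & SPEC =====
def Spec_sum_of_repeat_number (data : List Int) (out : Int) : Prop := out = sum_of_repeat_number_alt data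
instance (data : List Int) (out : Int) : Decidable (Spec_sum_of_repeat_number data out) := by unfold Spec_sum_of_repeat_number; infer_instance

-- ===== CLAIM (what is proved, stated in full; the proofs are below) =====
def Claim_equal_sum_of_repeat_number : Prop := ∀ (data : List Int), Dom_sum_of_repeat_number data → Spec_sum_of_repeat_number data (sum_of_repeat_number data)

-- ===== LEMMAS AND PROOFS =====

-- A's second loop applied to the counter of l
def aval (l : List Int) : Int :=
  (PySem.Dict.counter l).items.foldl (fun s p => if p.2 == 1 then s + p.1 else s) 0

lemma aval_sum (l : List Int) :
    aval l = ((PySem.Set.ofList l).map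
      (fun k => if (l.count k : Int) == 1 then k else 0)).sum := by
  unfold aval
  rw [PySem.Dict.items_counter, List.foldl_map]
  have h := PySem.List.foldl_add
    (l := PySem.Set.ofList l)
    (g := fun k => if (l.count k : Int) == 1 then k else 0) (a := (0 : Int))
  rw [zero_add] at h
  rw [← h]
  apply PySem.List.foldl_congr_mem
  intro acc x _
  by_cases hx : (l.count x : Int) == 1 <;> simp [hx]

lemma sum_map_congr {α : Type} (S : List α) (f g : α → Int)
    (h : ∀ k ∈ S, f k = g k) : (S.map f).sum = (S.map g).sum := by
  rw [List.map_congr_left h]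

lemma sum_map_update (S : List Int) (x : Int) (f g : Int → Int)
    (hnd : S.Nodup) (hx : x ∈ S) (h : ∀ k ∈ S, k ≠ x → f k = g k) :
    (S.map f).sum = (S.map g).sum + (f x - g x) := by
  induction S with
  | nil => cases hx
  | cons a S ih =>
    rcases List.mem_cons.mp hx with rfl | hxS
    · have : ∀ k ∈ S, f k = g k := by
        intro k hk
        exact h k (List.mem_cons_of_mem _ hk) (fun he => (List.nodup_cons.mp hnd).1 (he ▸ hk))
      simp only [List.map_cons, List.sum_cons]
      rw [sum_map_congr S f g this]; ring
    · have ha : f a = g a := h a List.mem_cons_self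
        (fun he => (List.nodup_cons.mp hnd).1 (he ▸ hxS))
      simp only [List.map_cons, List.sum_cons]
      rw [ha, ih (List.nodup_cons.mp hnd).2 hxS
        (fun k hk => h k (List.mem_cons_of_mem _ hk))]
      ring

lemma aval_step (xs : List Int) (x : Int) :
    aval (xs ++ [x]) =
      (if ((xs.count x : Int) + 1) == 1 then aval xs + x
       else if ((xs.count x : Int) + 1) == 2 then aval xs - x else aval xs) := by
  rw [aval_sum, aval_sum, PySem.Set.ofList_append_singleton]
  have hc : ∀ k : Int, ((xs ++ [x]).count k : Int)
      = (xs.count k : Int) + (if x = k then 1 else 0) := by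
    intro k
    rw [List.count_append]
    by_cases h : x = k <;> simp [h]
  by_cases hmem : x ∈ xs
  · have hxS : x ∈ PySem.Set.ofList xs := (PySem.Set.mem_ofList xs x).mpr hmem
    rw [PySem.Set.add_of_mem hxS]
    have heq : ∀ k ∈ PySem.Set.ofList xs, k ≠ x →
        (if (((xs ++ [x]).count k : Int)) == 1 then k else 0)
          = (if ((xs.count k : Int)) == 1 then k else 0) := by
      intro k _ hk
      have hxk : x ≠ k := fun h => hk h.symm
      rw [hc k]
      simp [hxk]
    rw [sum_map_update _ x _ _ (PySem.Set.nodup_ofList xs) hxS heq]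
    have hcx : ((xs ++ [x]).count x : Int) = (xs.count x : Int) + 1 := by
      rw [hc x]; simp
    have h1 : (1 : Int) ≤ (xs.count x : Int) := by
      exact_mod_cast List.one_le_count_iff.mpr hmem
    by_cases hone : (xs.count x : Int) = 1
    · simp only [hcx, hone]
      norm_num [sub_eq_add_neg]
    · have h2 : (2 : Int) ≤ (xs.count x : Int) := by omega
      have e1 : ¬ ((xs.count x : Int) + 1 == 1) := by simp; omega
      have e2 : ¬ ((xs.count x : Int) + 1 == 2) := by simp; omega
      have h3 : ¬ ((xs.count x : Int) == 1) := by simp [hone]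
      simp [e1, e2, h3]
  · rw [PySem.Set.add_of_not_mem (fun h => hmem ((PySem.Set.mem_ofList xs x).mp h))]
    have hcnt0 : (xs.count x : Int) = 0 := by
      exact_mod_cast List.count_eq_zero_of_not_mem hmem
    have heq : ∀ k ∈ PySem.Set.ofList xs,
        (if (((xs ++ [x]).count k : Int)) == 1 then k else 0)
          = (if ((xs.count k : Int)) == 1 then k else 0) := by
      intro k hk
      have hkx : x ≠ k := fun h => hmem (h ▸ (PySem.Set.mem_ofList xs k).mp hk)
      rw [hc k]; simp [hkx]
    rw [List.map_append, List.sum_append, sum_map_congr _ _ _ heq]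
    have hcx : ((xs ++ [x]).count x : Int) = 1 := by rw [hc x, hcnt0]; simp
    simp [hcnt0]

-- the two branches of A's first loop both insert count+1
lemma a_loop_eq_counter (l : List Int) :
    l.foldl (fun d num =>
      if d.contains num then d.insert num (d.getD num 0 + 1)
      else d.insert num 1) PySem.Dict.empty = PySem.Dict.counter l := by
  rw [← PySem.Dict.foldl_insert_getD_add_one_eq_counter]
  apply PySem.List.foldl_congr_mem
  intro d x _
  by_cases h : d.contains x
  · simp [h]
  · have h0 : d.getD x 0 = 0 := by
      simp [PySem.Dict.getD_of_not_contains, h]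
    simp [h, h0]

-- B's single pass maintains (counter of prefix, A's answer on the prefix)
lemma b_invariant (l : List Int) :
    l.foldl (fun st num =>
      let c := st.1.getD num 0 + 1
      (st.1.insert num c,
       if c == 1 then st.2 + num else if c == 2 then st.2 - num else st.2))
      ((PySem.Dict.empty : PySem.Dict Int Int), (0 : Int))
    = (PySem.Dict.counter l, aval l) := by
  induction l using List.reverseRecOn with
  | nil => rfl
  | append_singleton xs x ih =>
    rw [List.foldl_append, ih]
    simp only [List.foldl_cons, List.foldl_nil]
    have hgd : (PySem.Dict.counter xs).getD x 0 = (xs.count x : Int) :=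
      PySem.Dict.getD_counter xs x
    rw [Prod.mk.injEq]
    refine ⟨?_, ?_⟩
    · show (PySem.Dict.counter xs).insert x ((PySem.Dict.counter xs).getD x 0 + 1)
        = PySem.Dict.counter (xs ++ [x])
      rw [hgd, ← PySem.Dict.foldl_insert_getD_add_one_eq_counter,
        ← PySem.Dict.foldl_insert_getD_add_one_eq_counter, List.foldl_append]
      simp only [List.foldl_cons, List.foldl_nil]
      rw [PySem.Dict.foldl_insert_getD_add_one_eq_counter, hgd]
    · show (if (PySem.Dict.counter xs).getD x 0 + 1 == 1 then aval xs + x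
        else if (PySem.Dict.counter xs).getD x 0 + 1 == 2 then aval xs - x else aval xs)
        = aval (xs ++ [x])
      rw [hgd, aval_step]

-- ===== VERDICT (by name: the statement is the Claim_ definition above) =====
theorem sum_of_repeat_number_spec : Claim_equal_sum_of_repeat_number := by
  intro data _
  show sum_of_repeat_number data = sum_of_repeat_number_alt data
  unfold sum_of_repeat_number sum_of_repeat_number_alt
  rw [a_loop_eq_counter, b_invariant]
  rfl
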